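-- pv_equiv track=rewrite | github.com/delaguilaluis/advent-of-code-2020 | 7/a.py | getOutermostContainers
-- ===== SOURCE A (Python) =====
-- def containsBag(color, rule):
--     contents = rule[1]
--     return any(map(lambda x: x == color, contents))
--
-- def getOutermostContainers(color, rules, accum):
--     containers = list(filter(lambda x: containsBag(color, x), rules))
--
--     # Exit when no more containers are found
--     if len(containers) == 0:
--         return accum
--
--     for container in containers:
--         color = container[0]
--         if not color in accum:
--             accum.append(color)
--
--         getOutermostContainers(container[0], rules, accum)
--
--     return accum
-- ===== SOURCE B (Python) =====
-- def getOutermostContainers(color, rules, accum):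
--     # Build a reverse index once: inner color -> list of container names (rules order),
--     # then DFS from `color`, expanding each container at most once.
--     rev = {}
--     for name, contents in rules:
--         for c in dict.fromkeys(contents):
--             rev[c] = rev.get(c, []) + [name]
--     expanded = set()
--
--     def expand(u):
--         for name in rev.get(u, []):
--             if name not in accum:
--                 accum.append(name)
--             if name not in expanded:
--                 expanded.add(name)
--                 expand(name)
--
--     expand(color)
--     return accum
-- ===== Notes on version B (the rewrite author's own statement) =====
-- stated objective: alternative
-- what changed: B builds a reverse adjacency index (inner color -> container names) once and runs a single DFS with a visited (expanded) set so each container is expanded at most once, instead of A's recursion that rescans all rules at every visit and re-expands already-handled containers; on dense DAG inputs this avoids A's redundant re-expansion, but on the benchmark family both scale linearly and B's Python-level index build is not faster than A's C-level filter.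
import Mathlib
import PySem

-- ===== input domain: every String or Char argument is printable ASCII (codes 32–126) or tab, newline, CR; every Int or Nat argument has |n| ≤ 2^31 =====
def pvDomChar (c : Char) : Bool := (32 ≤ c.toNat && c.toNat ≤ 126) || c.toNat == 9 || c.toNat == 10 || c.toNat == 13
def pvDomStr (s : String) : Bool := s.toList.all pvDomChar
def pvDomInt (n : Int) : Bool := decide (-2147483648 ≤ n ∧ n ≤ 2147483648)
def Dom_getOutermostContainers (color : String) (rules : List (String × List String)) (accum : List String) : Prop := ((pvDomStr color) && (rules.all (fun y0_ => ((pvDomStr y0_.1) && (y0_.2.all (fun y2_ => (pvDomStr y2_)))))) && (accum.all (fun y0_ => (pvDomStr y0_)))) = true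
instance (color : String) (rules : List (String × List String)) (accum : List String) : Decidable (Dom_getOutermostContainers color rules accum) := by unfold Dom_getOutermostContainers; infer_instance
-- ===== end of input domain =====

-- B builds a reverse index once and does a DFS that expands each container at most once
-- (A re-expands containers it has already handled); both mutate/return the same accum list.

-- ===== PORT A =====
def containsBag (color : String) (rule : String × List String) : Bool :=
  rule.2.any (fun x => x == color)

mutual
-- the recursive body of A, with a fuel counter as a totality guard (rules.length + 1 levels
-- suffice for every input admitted by Pre_, where no cycle is reachable from color)
def aGo (rules : List (String × List String)) : Nat → String → List String → List String
  | 0, _, accum => accum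
  | Nat.succ n, color, accum =>
    let containers := rules.filter (fun x => containsBag color x)
    if containers.length = 0 then accum
    else aLoop rules n containers accum
termination_by n _ _ => (n, 0)
-- the 'for container in containers' loop of A
def aLoop (rules : List (String × List String)) : Nat → List (String × List String) → List String → List String
  | _, [], accum => accum
  | n, container :: rest, accum =>
    let accum' := if accum.contains container.1 then accum else accum ++ [container.1]
    aLoop rules n rest (aGo rules n container.1 accum')
termination_by n l _ => (n, l.length + 1)
end

def getOutermostContainers (color : String) (rules : List (String × List String)) (accum : List String) : List String :=
  aGo rules (rules.length + 1) color accum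

-- ===== PORT B =====
-- rev[c] = rev.get(c, []) + [name] for each distinct c in contents
def buildRev (rules : List (String × List String)) : PySem.Dict String (List String) :=
  rules.foldl (fun d r => (PySem.List.dedup r.2).foldl (fun d c => d.modify c [] (fun l => l ++ [r.1])) d) PySem.Dict.empty

mutual
-- expand(u): loop over rev.get(u, []); fuel is a totality guard (never exhausted: each nested
-- expand adds a fresh rule name to the seen-set, so nesting depth is at most rules.length + 1)
def bExpand (rev : PySem.Dict String (List String)) : Nat → String → PySem.Set String → List String → (PySem.Set String × List String)
  | 0, _, seen, accum => (seen, accum)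
  | Nat.succ n, u, seen, accum => bLoop rev n (rev.getD u []) seen accum
termination_by n _ _ _ => (n, 0)
def bLoop (rev : PySem.Dict String (List String)) : Nat → List String → PySem.Set String → List String → (PySem.Set String × List String)
  | _, [], seen, accum => (seen, accum)
  | n, name :: rest, seen, accum =>
    let accum' := if accum.contains name then accum else accum ++ [name]
    if seen.contains name then bLoop rev n rest seen accum'
    else
      let p := bExpand rev n name (PySem.Set.add seen name) accum'
      bLoop rev n rest p.1 p.2
termination_by n l _ _ => (n, l.length + 1)
end

def getOutermostContainers_alt (color : String) (rules : List (String × List String)) (accum : List String) : List String :=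
  (bExpand (buildRev rules) (rules.length + 1) color PySem.Set.empty accum).2

-- ===== PRECONDITION & SPEC =====
-- names directly containing u
def pvSuccs (rules : List (String × List String)) (u : String) : List String :=
  (rules.filter (fun r => r.2.contains u)).map Prod.fst
-- everything reachable from S in at most m steps of pvSuccs
def pvReach (rules : List (String × List String)) : Nat → List String → List String
  | 0, s => s
  | Nat.succ m, s => s ++ pvReach rules m (s.flatMap (pvSuccs rules))
-- Pre_ excludes exactly the inputs with a containment cycle reachable from color:
-- on those A recurses forever (RecursionError), so it returns on no such input.
def Pre_getOutermostContainers (color : String) (rules : List (String × List String)) (accum : List String) : Prop :=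
  ∀ k ∈ pvReach rules (rules.length + 1) [color], k ∉ pvReach rules rules.length (pvSuccs rules k)
instance (color : String) (rules : List (String × List String)) (accum : List String) : Decidable (Pre_getOutermostContainers color rules accum) := by unfold Pre_getOutermostContainers; infer_instance

def pvWitness_getOutermostContainers : String × (List (String × List String)) × List String :=
  ("red", [("blue", ["red"]), ("gold", ["blue", "red"])], [])

def Spec_getOutermostContainers (color : String) (rules : List (String × List String)) (accum : List String) (out : List String) : Prop := out = getOutermostContainers_alt color rules accum
instance (color : String) (rules : List (String × List String)) (accum : List String) (out : List String) : Decidable (Spec_getOutermostContainers color rules accum out) := by unfold Spec_getOutermostContainers; infer_instance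

-- ===== CLAIM (what is proved, stated in full; the proofs are below) =====
def Claim_equal_getOutermostContainers : Prop := ∀ (color : String) (rules : List (String × List String)) (accum : List String), Dom_getOutermostContainers color rules accum → Pre_getOutermostContainers color rules accum → Spec_getOutermostContainers color rules accum (getOutermostContainers color rules accum)

-- ===== LEMMAS AND PROOFS =====

-- the containment edge: u is directly contained in d
def edgeP (rules : List (String × List String)) (u d : String) : Prop :=
  ∃ p ∈ rules, p.1 = d ∧ u ∈ p.2
-- a path of exactly r edges
def stepsP (rules : List (String × List String)) : String → Nat → String → Prop
  | u, 0, v => u = v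
  | u, Nat.succ r, v => ∃ d, edgeP rules u d ∧ stepsP rules d r v
-- transitive containment
def tcP (rules : List (String × List String)) (u y : String) : Prop := ∃ r, stepsP rules u (r + 1) y
-- number of rule names not yet in the seen-set
def kfree (rules : List (String × List String)) (s : List String) : Nat :=
  ((rules.map Prod.fst).toFinset \ s.toFinset).card
-- invariant tying the seen-set to the accumulator at current node u
def invSA (rules : List (String × List String)) (u : String) (s : PySem.Set String) (a : List String) : Prop :=
  ∀ x ∈ s, (∃ r, stepsP rules x r u ∧ r + kfree rules s ≤ rules.length) ∨ (∀ y, tcP rules x y → y ∈ a)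


-- ---- unfolding equations ----
theorem aGo_zero (rules : List (String × List String)) (u : String) (a : List String) :
    aGo rules 0 u a = a := by rw [aGo]

theorem aGo_succ (rules : List (String × List String)) (n : Nat) (u : String) (a : List String) :
    aGo rules (n + 1) u a =
      (if (rules.filter (fun x => containsBag u x)).length = 0 then a
       else aLoop rules n (rules.filter (fun x => containsBag u x)) a) := by rw [aGo]

theorem aLoop_nil (rules : List (String × List String)) (n : Nat) (a : List String) :
    aLoop rules n [] a = a := by rw [aLoop]

theorem aLoop_cons (rules : List (String × List String)) (n : Nat) (c : String × List String)
    (rest : List (String × List String)) (a : List String) :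
    aLoop rules n (c :: rest) a =
      aLoop rules n rest (aGo rules n c.1 (if a.contains c.1 then a else a ++ [c.1])) := by rw [aLoop]

theorem bExpand_succ (rev : PySem.Dict String (List String)) (n : Nat) (u : String)
    (s : PySem.Set String) (a : List String) :
    bExpand rev (n + 1) u s a = bLoop rev n (rev.getD u []) s a := by rw [bExpand]

theorem bLoop_nil (rev : PySem.Dict String (List String)) (n : Nat)
    (s : PySem.Set String) (a : List String) :
    bLoop rev n [] s a = (s, a) := by rw [bLoop]

theorem bLoop_cons (rev : PySem.Dict String (List String)) (n : Nat) (name : String)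
    (rest : List String) (s : PySem.Set String) (a : List String) :
    bLoop rev n (name :: rest) s a =
      (if s.contains name then bLoop rev n rest s (if a.contains name then a else a ++ [name])
       else
         bLoop rev n rest
           (bExpand rev n name (PySem.Set.add s name) (if a.contains name then a else a ++ [name])).1
           (bExpand rev n name (PySem.Set.add s name) (if a.contains name then a else a ++ [name])).2) := by
  rw [bLoop]

theorem stepsP_zero (rules : List (String × List String)) (u v : String) :
    stepsP rules u 0 v ↔ u = v := by rw [stepsP]

theorem stepsP_succ (rules : List (String × List String)) (u v : String) (r : Nat) :
    stepsP rules u (r + 1) v ↔ ∃ d, edgeP rules u d ∧ stepsP rules d r v := by rw [stepsP]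

-- ---- small facts about the graph notions ----
theorem containsBag_iff (u : String) (r : String × List String) :
    containsBag u r = true ↔ u ∈ r.2 := by
  simp [containsBag]

theorem edge_iff_filter (rules : List (String × List String)) (u d : String) :
    edgeP rules u d ↔ ∃ p ∈ rules.filter (fun x => containsBag u x), p.1 = d := by
  constructor
  · rintro ⟨p, hp, h1, h2⟩
    exact ⟨p, List.mem_filter.mpr ⟨hp, (containsBag_iff u p).mpr h2⟩, h1⟩
  · rintro ⟨p, hp, h1⟩
    exact ⟨p, (List.mem_filter.mp hp).1, h1, (containsBag_iff u p).mp (List.mem_filter.mp hp).2⟩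

theorem edge_mem_keys (rules : List (String × List String)) (u d : String)
    (h : edgeP rules u d) : d ∈ rules.map Prod.fst := by
  obtain ⟨p, hp, h1, _⟩ := h
  exact h1 ▸ List.mem_map_of_mem hp

theorem edge_mem_succs (rules : List (String × List String)) (u d : String)
    (h : edgeP rules u d) : d ∈ pvSuccs rules u := by
  obtain ⟨p, hp, h1, h2⟩ := h
  subst h1
  exact List.mem_map_of_mem (List.mem_filter.mpr ⟨hp, by simpa using h2⟩)

theorem steps_snoc (rules : List (String × List String)) :
    ∀ (r : Nat) (x u d : String), stepsP rules x r u → edgeP rules u d →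
      stepsP rules x (r + 1) d := by
  intro r
  induction r with
  | zero =>
    intro x u d hst he
    rw [stepsP_zero] at hst
    subst hst
    exact (stepsP_succ ..).mpr ⟨d, he, (stepsP_zero ..).mpr rfl⟩
  | succ m ih =>
    intro x u d hst he
    obtain ⟨e, hxe, hst'⟩ := (stepsP_succ ..).mp hst
    exact (stepsP_succ ..).mpr ⟨e, hxe, ih e u d hst' he⟩

theorem tc_head (rules : List (String × List String)) (u d : String) (h : edgeP rules u d) :
    tcP rules u d := ⟨0, (stepsP_succ ..).mpr ⟨d, h, (stepsP_zero ..).mpr rfl⟩⟩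

theorem tc_cons (rules : List (String × List String)) (u d y : String)
    (h : edgeP rules u d) (h2 : tcP rules d y) : tcP rules u y := by
  obtain ⟨r, hs⟩ := h2
  exact ⟨r + 1, (stepsP_succ ..).mpr ⟨d, h, hs⟩⟩

-- ---- kfree facts ----
theorem kfree_le_len (rules : List (String × List String)) (s : List String) :
    kfree rules s ≤ rules.length := by
  calc kfree rules s ≤ (rules.map Prod.fst).toFinset.card :=
        Finset.card_le_card (Finset.sdiff_subset)
    _ ≤ (rules.map Prod.fst).length := List.toFinset_card_le _
    _ = rules.length := List.length_map ..

theorem kfree_mono (rules : List (String × List String)) (s t : List String)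
    (h : ∀ y ∈ s, y ∈ t) : kfree rules t ≤ kfree rules s := by
  apply Finset.card_le_card
  apply Finset.sdiff_subset_sdiff (Finset.Subset.refl _)
  intro y hy
  simp only [List.mem_toFinset] at hy ⊢
  exact h y hy

theorem set_add_of_not_mem (s : PySem.Set String) (x : String) (h : x ∉ s) :
    PySem.Set.add s x = s ++ [x] := by
  simp [PySem.Set.add, PySem.Set.contains]
  intro hc
  exact absurd hc h

theorem kfree_add_lt (rules : List (String × List String)) (s : PySem.Set String) (x : String)
    (hx : x ∈ rules.map Prod.fst) (hns : x ∉ s) :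
    kfree rules (PySem.Set.add s x) < kfree rules s := by
  rw [set_add_of_not_mem s x hns]
  apply Finset.card_lt_card
  constructor
  · apply Finset.sdiff_subset_sdiff (Finset.Subset.refl _)
    intro y hy
    simp only [List.mem_toFinset, List.mem_append] at hy ⊢
    exact Or.inl hy
  · intro hsub
    have : x ∈ (rules.map Prod.fst).toFinset \ s.toFinset := by
      simp [List.mem_toFinset, hx, hns]
    have := hsub this
    simp [List.mem_toFinset] at this

-- ---- the reverse index computes A's container list ----
theorem filter_beq_of_nodup (l : List String) (u : String) (h : l.Nodup) :
    l.filter (fun c => c == u) = if u ∈ l then [u] else [] := by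
  induction l with
  | nil => simp
  | cons a t ih =>
    rw [List.nodup_cons] at h
    rw [List.filter_cons]
    by_cases hau : a = u
    · subst hau
      have : t.filter (fun c => c == a) = [] :=
        List.filter_eq_nil_iff.mpr (by intro c hc; simp; rintro rfl; exact h.1 hc)
      simp [this]
    · rw [if_neg (by simpa using hau), ih h.2]
      by_cases hut : u ∈ t
      · rw [if_pos hut, if_pos (List.mem_cons_of_mem _ hut)]
      · rw [if_neg hut, if_neg (by simp [List.mem_cons, hut, Ne.symm hau])]

theorem revStep (d : PySem.Dict String (List String)) (cs : List String) (nm u : String) :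
    ((PySem.List.dedup cs).foldl (fun d c => d.modify c [] (fun l => l ++ [nm])) d).getD u [] =
      d.getD u [] ++ (if u ∈ cs then [nm] else []) := by
  have h1 : (PySem.List.dedup cs).foldl (fun d c => d.modify c [] (fun l => l ++ [nm])) d =
      ((PySem.List.dedup cs).map (fun c => (c, nm))).foldl
        (fun d p => d.modify p.1 [] (fun l => l ++ [p.2])) d := by
    rw [List.foldl_map]
  rw [h1, PySem.Dict.getD_foldl_modify_append]
  congr 1
  rw [List.filter_map]
  have : (PySem.List.dedup cs).filter ((fun p => p.1 == u) ∘ (fun c => (c, nm))) =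
      (PySem.List.dedup cs).filter (fun c => c == u) := by rfl
  rw [this, filter_beq_of_nodup _ _ (PySem.List.nodup_dedup cs)]
  by_cases hm : u ∈ cs
  · rw [if_pos ((PySem.List.mem_dedup cs u).mpr hm), if_pos hm]
    simp
  · rw [if_neg (fun hc => hm ((PySem.List.mem_dedup cs u).mp hc)), if_neg hm]
    simp

theorem revGetD_aux (u : String) :
    ∀ (rs : List (String × List String)) (d : PySem.Dict String (List String)),
      (rs.foldl (fun d r => (PySem.List.dedup r.2).foldl
          (fun d c => d.modify c [] (fun l => l ++ [r.1])) d) d).getD u [] =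
        d.getD u [] ++ (rs.filter (fun x => containsBag u x)).map Prod.fst := by
  intro rs
  induction rs with
  | nil => intro d; simp
  | cons r rt ih =>
    intro d
    rw [List.foldl_cons, ih, revStep, List.filter_cons]
    by_cases hm : u ∈ r.2
    · rw [if_pos hm, if_pos (show containsBag u r = true from (containsBag_iff u r).mpr hm)]
      simp
    · rw [if_neg hm, if_neg (show ¬ containsBag u r = true from by simp [containsBag_iff u r, hm])]
      simp

theorem revGetD (rules : List (String × List String)) (u : String) :
    (buildRev rules).getD u [] = (rules.filter (fun x => containsBag u x)).map Prod.fst := by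
  rw [buildRev, revGetD_aux, PySem.Dict.getD_empty]
  simp

-- ---- Pre_ implies bounded acyclicity ----
theorem reach_mem (rules : List (String × List String)) :
    ∀ (m : Nat) (S : List String) (x v : String) (r : Nat),
      x ∈ S → stepsP rules x r v → r ≤ m → v ∈ pvReach rules m S := by
  intro m
  induction m with
  | zero =>
    intro S x v r hx hs hr
    interval_cases r
    rw [stepsP_zero] at hs
    subst hs
    simpa [pvReach] using hx
  | succ k ih =>
    intro S x v r hx hs hr
    match r with
    | 0 =>
      rw [stepsP_zero] at hs
      subst hs
      simp [pvReach, hx]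
    | r' + 1 =>
      obtain ⟨d, he, hs'⟩ := (stepsP_succ ..).mp hs
      have hd : d ∈ S.flatMap (pvSuccs rules) :=
        List.mem_flatMap.mpr ⟨x, hx, edge_mem_succs rules x d he⟩
      simp only [pvReach, List.mem_append]
      exact Or.inr (ih _ d v r' hd hs' (by omega))


-- ---- A's recursion is a no-op once the transitive containers are all present ----
theorem noopBoth (rules : List (String × List String)) :
    ∀ n : Nat,
      (∀ (u : String) (a : List String), (∀ y, tcP rules u y → y ∈ a) → aGo rules n u a = a) ∧
      (∀ (L : List (String × List String)) (a : List String),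
        (∀ p ∈ L, p.1 ∈ a ∧ (∀ y, tcP rules p.1 y → y ∈ a)) → aLoop rules n L a = a) := by
  have loopPart : ∀ n : Nat,
      (∀ (u : String) (a : List String), (∀ y, tcP rules u y → y ∈ a) → aGo rules n u a = a) →
      (∀ (L : List (String × List String)) (a : List String),
        (∀ p ∈ L, p.1 ∈ a ∧ (∀ y, tcP rules p.1 y → y ∈ a)) → aLoop rules n L a = a) := by
    intro n hE L
    induction L with
    | nil => intro a _; exact aLoop_nil ..
    | cons c rest ih =>
      intro a h
      obtain ⟨hc1, hc2⟩ := h c (List.mem_cons_self ..)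
      rw [aLoop_cons]
      rw [if_pos (by simpa using hc1)]
      rw [hE c.1 a hc2]
      exact ih a (fun p hp => h p (List.mem_cons_of_mem _ hp))
  intro n
  induction n with
  | zero =>
    constructor
    · intro u a _; exact aGo_zero ..
    · exact loopPart 0 (fun u a _ => aGo_zero ..)
  | succ m ih =>
    have hE : ∀ (u : String) (a : List String),
        (∀ y, tcP rules u y → y ∈ a) → aGo rules (m + 1) u a = a := by
      intro u a h
      rw [aGo_succ]
      split
      · rfl
      · apply ih.2
        intro p hp
        have hedge : edgeP rules u p.1 :=
          ⟨p, (List.mem_filter.mp hp).1, rfl, (containsBag_iff u p).mp (List.mem_filter.mp hp).2⟩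
        exact ⟨h p.1 (tc_head rules u p.1 hedge), fun y hy => h y (tc_cons rules u p.1 y hedge hy)⟩
    exact ⟨hE, loopPart (m + 1) hE⟩

-- ---- the main simulation lemma ----
theorem mainE (rules : List (String × List String)) (root : String)
    (hpre : ∀ k ∈ pvReach rules (rules.length + 1) [root],
      k ∉ pvReach rules rules.length (pvSuccs rules k)) :
    ∀ nA nB : Nat, ∀ (u : String) (s : PySem.Set String) (a : List String),
      invSA rules u s a →
      (∃ t, stepsP rules root t u ∧ t + kfree rules s ≤ rules.length) →
      kfree rules s < nA → kfree rules s < nB →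
      aGo rules nA u a = (bExpand (buildRev rules) nB u s a).2 ∧
      (∀ y ∈ a, y ∈ (bExpand (buildRev rules) nB u s a).2) ∧
      (∀ x ∈ (bExpand (buildRev rules) nB u s a).1,
        x ∈ s ∨ (∀ y, tcP rules x y → y ∈ (bExpand (buildRev rules) nB u s a).2)) ∧
      (∀ y, tcP rules u y → y ∈ (bExpand (buildRev rules) nB u s a).2) ∧
      (∀ x ∈ s, x ∈ (bExpand (buildRev rules) nB u s a).1) := by
  intro nA
  induction nA with
  | zero =>
    intro nB u s a _ _ hA _
    omega
  | succ m IH =>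
    intro nB u s a hinv hroot hA hB
    obtain ⟨k, rfl⟩ : ∃ k, nB = k + 1 := ⟨nB - 1, by omega⟩
    rw [bExpand_succ, revGetD]
    rw [aGo_succ]
    -- the generic loop lemma at A-fuel m, B-fuel k
    have loopL : ∀ (L : List (String × List String)) (s : PySem.Set String) (a : List String),
        (∀ p ∈ L, edgeP rules u p.1) → invSA rules u s a →
        (∃ t, stepsP rules root t u ∧ t + kfree rules s ≤ rules.length) →
        kfree rules s ≤ m → kfree rules s ≤ k →
        aLoop rules m L a = (bLoop (buildRev rules) k (L.map Prod.fst) s a).2 ∧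
        (∀ y ∈ a, y ∈ (bLoop (buildRev rules) k (L.map Prod.fst) s a).2) ∧
        (∀ x ∈ (bLoop (buildRev rules) k (L.map Prod.fst) s a).1,
          x ∈ s ∨ (∀ y, tcP rules x y → y ∈ (bLoop (buildRev rules) k (L.map Prod.fst) s a).2)) ∧
        (∀ p ∈ L, p.1 ∈ (bLoop (buildRev rules) k (L.map Prod.fst) s a).2 ∧
          (∀ y, tcP rules p.1 y → y ∈ (bLoop (buildRev rules) k (L.map Prod.fst) s a).2)) ∧
        (∀ x ∈ s, x ∈ (bLoop (buildRev rules) k (L.map Prod.fst) s a).1) := by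
      intro L
      induction L with
      | nil =>
        intro s a _ _ _ _ _
        rw [List.map_nil, bLoop_nil, aLoop_nil]
        exact ⟨rfl, fun y hy => hy, fun x hx => Or.inl hx, by simp, fun x hx => hx⟩
      | cons c rest ihr =>
        intro s a hedges hinv hru hsm hsk
        have hedgec : edgeP rules u c.1 := hedges c (List.mem_cons_self ..)
        obtain ⟨t, hrt, hbt⟩ := hru
        rw [List.map_cons, bLoop_cons, aLoop_cons]
        set a1 := if a.contains c.1 then a else a ++ [c.1] with ha1def
        have ha1 : ∀ y ∈ a, y ∈ a1 := by
          intro y hy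
          rw [ha1def]; split
          · exact hy
          · exact List.mem_append_left _ hy
        have hc1a1 : c.1 ∈ a1 := by
          rw [ha1def]; split
          · next hcon => simpa using hcon
          · exact List.mem_append_right _ (List.mem_singleton.mpr rfl)
        by_cases hseen : c.1 ∈ s
        · -- already expanded: A's recursive call is a no-op
          rw [if_pos (by simpa [PySem.Set.contains_iff] using hseen)]
          rcases hinv c.1 hseen with ⟨r, hst, hb⟩ | hcl
          · -- c.1 would lie on a containment cycle reachable from root: excluded by Pre_
            have hreach : c.1 ∈ pvReach rules (rules.length + 1) [root] :=
              reach_mem rules (rules.length + 1) [root] root c.1 (t + 1)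
                (List.mem_singleton.mpr rfl) (steps_snoc rules t root u c.1 hrt hedgec)
                (by omega)
            obtain ⟨d, he, hs⟩ := (stepsP_succ ..).mp (steps_snoc rules r c.1 u c.1 hst hedgec)
            exact absurd (reach_mem rules rules.length (pvSuccs rules c.1) d c.1 r
              (edge_mem_succs rules c.1 d he) hs (by omega)) (hpre c.1 hreach)
          · have hnoop : aGo rules m c.1 a1 = a1 :=
              (noopBoth rules m).1 c.1 a1 (fun y hy => ha1 y (hcl y hy))
            rw [hnoop]
            obtain ⟨l1, l2, l3, l4, l5⟩ := ihr s a1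
              (fun p hp => hedges p (List.mem_cons_of_mem _ hp))
              (by
                intro x hx
                rcases hinv x hx with ⟨r, hst, hb⟩ | hcl'
                · exact Or.inl ⟨r, hst, hb⟩
                · exact Or.inr (fun y hy => ha1 y (hcl' y hy)))
              ⟨t, hrt, hbt⟩ hsm hsk
            refine ⟨l1, fun y hy => l2 y (ha1 y hy), l3, ?_, l5⟩
            intro p hp
            rcases List.mem_cons.mp hp with rfl | hp'
            · exact ⟨l2 _ hc1a1, fun y hy => l2 y (ha1 y (hcl y hy))⟩
            · exact l4 p hp'
        · -- fresh: expand it on both sides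
          rw [if_neg (by simpa [PySem.Set.contains_iff] using hseen)]
          have hkey : c.1 ∈ rules.map Prod.fst := edge_mem_keys rules u c.1 hedgec
          have hklt : kfree rules (PySem.Set.add s c.1) < kfree rules s :=
            kfree_add_lt rules s c.1 hkey hseen
          obtain ⟨e1, e2, e3, e4, e5⟩ := IH k c.1 (PySem.Set.add s c.1) a1
            (by
              intro x hx
              rcases (PySem.Set.mem_add s c.1 x).mp hx with hx' | rfl
              · rcases hinv x hx' with ⟨r, hst, hb⟩ | hcl'
                · exact Or.inl ⟨r + 1, steps_snoc rules r x u c.1 hst hedgec, by omega⟩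
                · exact Or.inr (fun y hy => ha1 y (hcl' y hy))
              · exact Or.inl ⟨0, (stepsP_zero ..).mpr rfl, by
                  have := kfree_le_len rules (PySem.Set.add s c.1)
                  omega⟩)
            ⟨t + 1, steps_snoc rules t root u c.1 hrt hedgec, by omega⟩
            (by omega) (by omega)
          set p := bExpand (buildRev rules) k c.1 (PySem.Set.add s c.1) a1 with hpdef
          have hsub : ∀ y ∈ s, y ∈ p.1 := by
            intro y hy
            exact e5 y ((PySem.Set.mem_add s c.1 y).mpr (Or.inl hy))
          have hmono1 : kfree rules p.1 ≤ kfree rules (PySem.Set.add s c.1) :=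
            kfree_mono rules _ _ e5
          obtain ⟨l1, l2, l3, l4, l5⟩ := ihr p.1 p.2
            (fun q hq => hedges q (List.mem_cons_of_mem _ hq))
            (by
              intro x hx
              rcases e3 x hx with hx' | hcl'
              · rcases (PySem.Set.mem_add s c.1 x).mp hx' with hx'' | rfl
                · rcases hinv x hx'' with ⟨r, hst, hb⟩ | hcl''
                  · refine Or.inl ⟨r, hst, ?_⟩
                    have := kfree_mono rules s p.1 hsub
                    omega
                  · exact Or.inr (fun y hy => e2 y (ha1 y (hcl'' y hy)))
                · exact Or.inr e4
              · exact Or.inr hcl')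
            ⟨t, hrt, by
              have := kfree_mono rules s p.1 hsub
              omega⟩
            (by omega) (by omega)
          rw [e1] at *
          refine ⟨l1, ?_, ?_, ?_, ?_⟩
          · intro y hy; exact l2 y (e2 y (ha1 y hy))
          · intro x hx
            rcases l3 x hx with hx' | hcl'
            · rcases e3 x hx' with hx'' | hcl''
              · rcases (PySem.Set.mem_add s c.1 x).mp hx'' with hx3 | rfl
                · exact Or.inl hx3
                · exact Or.inr (fun y hy => l2 y (e4 y hy))
              · exact Or.inr (fun y hy => l2 y (hcl'' y hy))
            · exact Or.inr hcl'
          · intro q hq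
            rcases List.mem_cons.mp hq with rfl | hq'
            · exact ⟨l2 _ (e2 _ hc1a1), fun y hy => l2 y (e4 y hy)⟩
            · exact l4 q hq'
          · intro x hx
            exact l5 x (hsub x hx)
    -- back to the expand level
    by_cases hfilt : rules.filter (fun x => containsBag u x) = []
    · rw [hfilt]
      simp only [List.length_nil, List.map_nil, bLoop_nil]
      refine ⟨rfl, fun y hy => hy, fun x hx => Or.inl hx, ?_, fun x hx => hx⟩
      intro y hy
      obtain ⟨r, hs⟩ := hy
      obtain ⟨d, he, _⟩ := (stepsP_succ ..).mp hs
      obtain ⟨q, hq, _⟩ := (edge_iff_filter rules u d).mp he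
      rw [hfilt] at hq
      exact absurd hq (List.not_mem_nil)
    · rw [if_neg (by simpa [List.length_eq_zero_iff] using hfilt)]
      obtain ⟨l1, l2, l3, l4, l5⟩ := loopL (rules.filter (fun x => containsBag u x)) s a
        (by
          intro q hq
          exact ⟨q, (List.mem_filter.mp hq).1, rfl,
            (containsBag_iff u q).mp (List.mem_filter.mp hq).2⟩)
        hinv hroot (by omega) (by omega)
      refine ⟨l1, l2, l3, ?_, l5⟩
      intro y hy
      obtain ⟨r, hs⟩ := hy
      obtain ⟨d, he, hs'⟩ := (stepsP_succ ..).mp hs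
      obtain ⟨q, hq, hqd⟩ := (edge_iff_filter rules u d).mp he
      obtain ⟨hq1, hq2⟩ := l4 q hq
      match r with
      | 0 =>
        rw [stepsP_zero] at hs'
        subst hs'
        exact hqd ▸ hq1
      | r' + 1 =>
        exact hq2 y (hqd ▸ ⟨r', hs'⟩)

theorem getOutermostContainers_spec : Claim_equal_getOutermostContainers := by
  intro color rules accum _hdom hpre
  unfold Spec_getOutermostContainers getOutermostContainers getOutermostContainers_alt
  have hb : kfree rules PySem.Set.empty < rules.length + 1 := by
    have := kfree_le_len rules PySem.Set.empty
    omega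
  exact (mainE rules color hpre (rules.length + 1) (rules.length + 1) color PySem.Set.empty accum
    (by intro x hx; exact absurd hx (List.not_mem_nil))
    ⟨0, (stepsP_zero ..).mpr rfl, by
      have := kfree_le_len rules PySem.Set.empty
      omega⟩ hb hb).1
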